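-- pv_equiv track=rewrite | github.com/alexandraback/datacollection | solutions_5634697451274240_0/Python/dbooth/solve.py | solve
-- ===== SOURCE A (Python) =====
-- def solve(S):
--     S_rev = S[::-1]
--     ending_happy = 0
--     for c in S_rev:
--         if c == '+':
--             ending_happy += 1
--         else:
--             break
--     S_trim = S
--     if ending_happy != 0:
--         S_trim = S[:-ending_happy]
--
--     flips = 0
--     cur_char = ' '
--     for c in S_trim:
--         if c == cur_char:
--             continue
--         flips += 1
--         cur_char = c
--     return flips
-- ===== SOURCE B (Python) =====
-- def solve(S):
--     # Count maximal runs by repeatedly stripping the whole leading run.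
--     # Trailing '+' never counts (rstrip); a leading run of spaces never counts
--     # as a flip either, since flips are counted relative to an initial ' '.
--     t = S.rstrip('+').lstrip(' ')
--     flips = 0
--     while t:
--         t = t.lstrip(t[0])
--         flips += 1
--     return flips
-- ===== Notes on version B (the rewrite author's own statement) =====
-- stated objective: simpler
-- what changed: B replaces A's three phases (reverse scan counting trailing '+', slice-trim, then a per-character loop maintaining cur_char/flips state) with rstrip('+')/lstrip(' ') and a loop that strips one whole leading run per iteration via t.lstrip(t[0]), counting iterations -- no per-character comparison state at all.
import Mathlib
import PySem

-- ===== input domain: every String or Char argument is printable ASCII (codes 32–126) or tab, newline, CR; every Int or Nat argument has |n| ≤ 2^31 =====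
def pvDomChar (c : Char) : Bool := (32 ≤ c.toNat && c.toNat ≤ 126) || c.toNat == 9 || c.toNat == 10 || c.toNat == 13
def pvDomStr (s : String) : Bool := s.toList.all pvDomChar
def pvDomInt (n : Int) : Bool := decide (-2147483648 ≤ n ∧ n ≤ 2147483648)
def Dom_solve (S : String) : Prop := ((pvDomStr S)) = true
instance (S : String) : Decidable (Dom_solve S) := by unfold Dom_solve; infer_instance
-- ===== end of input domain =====

-- B counts maximal runs by repeatedly lstrip-ing the whole leading run (rstrip('+') first,
-- leading spaces never count), instead of A's reverse scan + slice-trim + per-character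
-- sentinel loop; objective: simpler.

-- ===== PORT A =====
-- the 'for c in S_rev: … break' loop counting leading '+' of the reversed string
def solveCountPlus : List Char → Int
  | [] => 0
  | c :: rest => if c = '+' then 1 + solveCountPlus rest else 0

-- the second loop: flips/cur_char accumulator
def solveFlips : List Char → Char → Int → Int
  | [], _, flips => flips
  | c :: rest, cur, flips =>
      if c = cur then solveFlips rest cur flips else solveFlips rest c (flips + 1)

def solve (S : String) : Int :=
  -- S[::-1]: step -1 never raises, so getD [] is never the default branch
  let sRev := (PySem.List.slice? S.toList none none (-1)).getD []
  let endingHappy := solveCountPlus sRev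
  let sTrim := if endingHappy ≠ 0 then PySem.List.slice S.toList none (some (-endingHappy)) else S.toList
  solveFlips sTrim ' ' 0

-- ===== PORT B =====
-- Python's one-sided strip with a single strip character c is exactly dropWhile (· == c)
-- on the character list (rstrip from the right = reverse/dropWhile/reverse); ported by hand.
-- the 'while t: t = t.lstrip(t[0]); flips += 1' loop of Source B
def solveRuns : List Char → Int
  | [] => 0
  | c :: rest => 1 + solveRuns (rest.dropWhile (fun d => d == c))
termination_by l => l.length
decreasing_by
  exact Nat.lt_succ_of_le (List.length_dropWhile_le _ _)

def solve_alt (S : String) : Int :=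
  -- t = S.rstrip('+').lstrip(' ')
  let t := ((S.toList.reverse.dropWhile (fun c => c == '+')).reverse).dropWhile (fun c => c == ' ')
  solveRuns t

-- ===== PRECONDITION & SPEC =====
def Spec_solve (S : String) (out : Int) : Prop := out = solve_alt S
instance (S : String) (out : Int) : Decidable (Spec_solve S out) := by unfold Spec_solve; infer_instance

-- ===== CLAIM (what is proved, stated in full; the proofs are below) =====
def Claim_equal_solve : Prop := ∀ (S : String), Dom_solve S → Spec_solve S (solve S)

-- ===== LEMMAS AND PROOFS =====

-- number of maximal contiguous blocks of l, given the "previous character" state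
def blocksGen : Option Char → List Char → Int
  | _, [] => 0
  | prev, c :: rest => (if some c = prev then 0 else 1) + blocksGen (some c) rest

-- l with its maximal trailing run of '+' removed, front-recursively
def trimPlus : List Char → List Char
  | [] => []
  | c :: rest => if trimPlus rest = [] ∧ c = '+' then [] else c :: trimPlus rest

theorem solveFlips_eq (l : List Char) : ∀ (cur : Char) (f : Int),
    solveFlips l cur f = f + blocksGen (some cur) l := by
  induction l with
  | nil => intro cur f; simp [solveFlips, blocksGen]
  | cons c rest ih =>
      intro cur f
      by_cases h : c = cur <;> simp [solveFlips, blocksGen, h, ih] <;> ring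

theorem solveCountPlus_eq (m : List Char) :
    solveCountPlus m = ((m.takeWhile (fun c => c == '+')).length : Int) := by
  induction m with
  | nil => simp [solveCountPlus]
  | cons c rest ih =>
      by_cases h : c = '+' <;> simp [solveCountPlus, List.takeWhile_cons, h, ih] <;> ring

theorem trimPlus_eq (l : List Char) :
    trimPlus l = (l.reverse.dropWhile (fun c => c == '+')).reverse := by
  induction l with
  | nil => simp [trimPlus]
  | cons c rest ih =>
      simp only [trimPlus, List.reverse_cons, List.dropWhile_append, ih]
      by_cases h : (rest.reverse.dropWhile (fun c => c == '+')) = [] <;>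
        by_cases hc : c = '+' <;>
        simp [h, hc, List.dropWhile_cons]

-- A's computed S_trim equals trimPlus
theorem sTrim_eq (l : List Char) :
    (if solveCountPlus l.reverse ≠ 0 then PySem.List.slice l none (some (-(solveCountPlus l.reverse))) else l)
      = trimPlus l := by
  rw [trimPlus_eq, solveCountPlus_eq]
  set tw := l.reverse.takeWhile (fun c => c == '+') with htw
  set dw := l.reverse.dropWhile (fun c => c == '+') with hdw
  have hsplit : l.reverse = tw ++ dw := (List.takeWhile_append_dropWhile).symm
  have hl : l = dw.reverse ++ tw.reverse := by
    have := congrArg List.reverse hsplit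
    simpa using this
  by_cases h : tw.length = 0
  · have : tw = [] := List.eq_nil_of_length_eq_zero h
    simp [h, this] at hl ⊢
    simp [hl]
  · have hpos : 0 < tw.length := Nat.pos_of_ne_zero h
    have hcast : (tw.length : Int) ≠ 0 := by exact_mod_cast h
    rw [if_pos hcast, PySem.List.slice_to_neg_natCast _ _ hpos]
    have hlen : l.length = dw.reverse.length + tw.length := by
      rw [hl]; simp [Nat.add_comm]
    rw [hlen, Nat.add_sub_cancel, hl, List.take_left]

-- A's block count with sentinel p equals B's run count after stripping the leading p-run
theorem blocksGen_eq_solveRuns (l : List Char) : ∀ (p : Char),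
    blocksGen (some p) l = solveRuns (l.dropWhile (fun c => c == p)) := by
  induction l with
  | nil => intro p; simp [blocksGen, solveRuns]
  | cons c rest ih =>
      intro p
      by_cases h : c = p
      · subst h
        simp [blocksGen, ih]
      · simp [blocksGen, h, solveRuns, ih c]

theorem solve_eq_alt (S : String) : solve S = solve_alt S := by
  unfold solve
  simp only [PySem.List.slice?_none_none_neg_one, Option.getD_some]
  rw [solveFlips_eq, sTrim_eq, blocksGen_eq_solveRuns, trimPlus_eq]
  simp [solve_alt]

-- ===== VERDICT (by name: the statement is the Claim_ definition above) =====
theorem solve_spec : Claim_equal_solve := by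
  intro S _
  exact solve_eq_alt S
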